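-- pv_equiv track=rewrite | github.com/6v6/algorithm-for-codingTest2 | programmers/kakao2019winter/pro64062.py | check
-- ===== SOURCE A (Python) =====
-- def check(mid, stones, k):
--     count = 0
--     for s in stones:
--         if s < mid:
--             count += 1
--             if count >= k:
--                 return False
--         else:
--             count = 0
--
--     return True
-- ===== SOURCE B (Python) =====
-- def check(mid, stones, k):
--     blockers = [-1] + [i for i, s in enumerate(stones) if s >= mid] + [len(stones)]
--     return all(b - a - 1 < k for a, b in zip(blockers, blockers[1:]))
-- ===== Notes on version B (the rewrite author's own statement) =====
-- stated objective: alternative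
-- what changed: Instead of a counter-reset scan, B collects the indices of blocking stones (>= mid) with sentinels -1 and len(stones) and checks that no gap between consecutive blockers holds k or more stones.
-- outside the precondition, e.g. on check(5, [], 0): A returns True, B returns False; on check(5, [9], 0): A returns True, B returns False
import Mathlib
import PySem

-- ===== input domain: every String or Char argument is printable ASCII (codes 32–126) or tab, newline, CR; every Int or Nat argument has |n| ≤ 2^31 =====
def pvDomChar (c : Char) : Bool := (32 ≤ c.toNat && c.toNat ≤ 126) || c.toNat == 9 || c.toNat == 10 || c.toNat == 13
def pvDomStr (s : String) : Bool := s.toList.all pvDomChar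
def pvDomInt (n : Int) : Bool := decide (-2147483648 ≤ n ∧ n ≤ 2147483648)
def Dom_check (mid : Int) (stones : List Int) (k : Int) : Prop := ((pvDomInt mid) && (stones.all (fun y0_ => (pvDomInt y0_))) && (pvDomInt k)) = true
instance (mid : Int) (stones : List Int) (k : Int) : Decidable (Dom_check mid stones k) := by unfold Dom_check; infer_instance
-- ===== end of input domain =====

-- B replaces A's counter-reset scan by a blocker-index/gap formulation; Pre_ excludes the degenerate k <= 0, where A's and B's readings of "k consecutive stones" both make sense.


-- ===== PORT A =====
-- the for-loop with early return, as structural recursion over stones carrying `count`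
def checkGo (mid k : Int) (count : Int) : List Int → Bool
  | [] => true
  | s :: rest =>
    if s < mid then
      if count + 1 ≥ k then false else checkGo mid k (count + 1) rest
    else checkGo mid k 0 rest

def check (mid : Int) (stones : List Int) (k : Int) : Bool :=
  checkGo mid k 0 stones

-- ===== PORT B =====
-- [i for i, s in enumerate(stones) if s >= mid], the indices of blocking stones
def idxGe (mid : Int) (i : Int) : List Int → List Int
  | [] => []
  | s :: rest => if s ≥ mid then i :: idxGe mid (i + 1) rest else idxGe mid (i + 1) rest

-- all(b - a - 1 < k for a, b in zip(blockers, blockers[1:]))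
def allGaps (k : Int) : List Int → Bool
  | a :: b :: t => decide (b - a - 1 < k) && allGaps k (b :: t)
  | _ => true

def check_alt (mid : Int) (stones : List Int) (k : Int) : Bool :=
  allGaps k (-1 :: (idxGe mid 0 stones ++ [(stones.length : Int)]))

-- ===== PRECONDITION & SPEC =====
-- Pre_ excludes k ≤ 0, a degenerate count outside the problem's domain, on which A still returns
-- a value: A's counter only fires after seeing a stone below mid (True on all-≥-mid lists), while
-- B's empty gap of length 0 already reaches k; both readings of "k consecutive stones" are defensible.
def Pre_check (mid : Int) (stones : List Int) (k : Int) : Prop := 1 ≤ k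
instance (mid : Int) (stones : List Int) (k : Int) : Decidable (Pre_check mid stones k) := by unfold Pre_check; infer_instance
def pvWitness_check : Int × List Int × Int := (2, [1, 3, 1, 1, 3], 2)

def Spec_check (mid : Int) (stones : List Int) (k : Int) (out : Bool) : Prop := out = check_alt mid stones k
instance (mid : Int) (stones : List Int) (k : Int) (out : Bool) : Decidable (Spec_check mid stones k out) := by unfold Spec_check; infer_instance

-- ===== CLAIM (what is proved, stated in full; the proofs are below) =====
def Claim_equal_check : Prop := ∀ (mid : Int) (stones : List Int) (k : Int), Dom_check mid stones k → Pre_check mid stones k → Spec_check mid stones k (check mid stones k)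

-- ===== LEMMAS AND PROOFS =====

-- the blocker list (from start index i, closed by its sentinel) starts with a value ≥ i
lemma idxGe_head_ge (mid : Int) :
    ∀ (stones : List Int) (i : Int),
      ∃ b t, idxGe mid i stones ++ [i + (stones.length : Int)] = b :: t ∧ i ≤ b := by
  intro stones
  induction stones with
  | nil => intro i; exact ⟨i + 0, [], by simp [idxGe], by omega⟩
  | cons s rest ih =>
    intro i
    by_cases hs : s ≥ mid
    · refine ⟨i, idxGe mid (i + 1) rest ++ [i + ((s :: rest).length : Int)], ?_, le_refl i⟩
      simp [idxGe, hs]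
    · obtain ⟨b, t, hbt, hb⟩ := ih (i + 1)
      refine ⟨b, t, ?_, by omega⟩
      rw [show idxGe mid i (s :: rest) = idxGe mid (i + 1) rest from by simp [idxGe, hs]]
      rw [show i + ((s :: rest).length : Int) = (i + 1) + (rest.length : Int) from by push_cast [List.length_cons]; omega]
      exact hbt

-- how A's scan relates to B's gap check: `count` stones below mid were seen since the last
-- blocker at position p, the current index is i
lemma checkGo_gaps (mid k : Int) :
    ∀ (stones : List Int) (count p i : Int),
      0 ≤ count → i = p + 1 + count → count < k →
      checkGo mid k count stones = allGaps k (p :: (idxGe mid i stones ++ [i + (stones.length : Int)])) := by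
  intro stones
  induction stones with
  | nil =>
    intro count p i hc0 hi hc
    simp only [checkGo, idxGe, List.nil_append, List.length_nil]
    rw [show allGaps k [p, i + ((0 : Nat) : Int)] = (decide (i + ((0 : Nat) : Int) - p - 1 < k) && true) from rfl]
    simp only [Bool.and_true]
    exact (decide_eq_true (by push_cast; omega)).symm
  | cons s rest ih =>
    intro count p i hc0 hi hc
    by_cases hs : s < mid
    · rw [show checkGo mid k count (s :: rest)
            = (if count + 1 ≥ k then false else checkGo mid k (count + 1) rest) from by
          simp [checkGo, hs]]
      rw [show idxGe mid i (s :: rest) = idxGe mid (i + 1) rest from by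
          simp [idxGe, show ¬ s ≥ mid by omega]]
      rw [show i + (((s :: rest).length : Nat) : Int) = (i + 1) + (rest.length : Int) from by
          push_cast [List.length_cons]; omega]
      by_cases hk : count + 1 ≥ k
      · rw [if_pos hk]
        obtain ⟨b, t, hbt, hb⟩ := idxGe_head_ge mid rest (i + 1)
        rw [hbt]
        simp [allGaps, show ¬ b - p - 1 < k by omega]
      · rw [if_neg hk, ih (count + 1) p (i + 1) (by omega) (by omega) (by omega)]
    · rw [show checkGo mid k count (s :: rest) = checkGo mid k 0 rest from by simp [checkGo, hs]]
      rw [show idxGe mid i (s :: rest) = i :: idxGe mid (i + 1) rest from by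
          simp [idxGe, show s ≥ mid by omega]]
      rw [show i + (((s :: rest).length : Nat) : Int) = (i + 1) + (rest.length : Int) from by
          push_cast [List.length_cons]; omega]
      rw [show (p :: (i :: idxGe mid (i + 1) rest ++ [(i + 1) + (rest.length : Int)]))
            = p :: i :: (idxGe mid (i + 1) rest ++ [(i + 1) + (rest.length : Int)]) from by simp]
      rw [show allGaps k (p :: i :: (idxGe mid (i + 1) rest ++ [(i + 1) + (rest.length : Int)]))
            = (decide (i - p - 1 < k) && allGaps k (i :: (idxGe mid (i + 1) rest ++ [(i + 1) + (rest.length : Int)]))) from rfl]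
      rw [ih 0 i (i + 1) (by omega) (by omega) (by omega)]
      simp [show i - p - 1 < k by omega]

-- ===== VERDICT (by name: the statement is the Claim_ definition above) =====
theorem check_spec : Claim_equal_check := by
  intro mid stones k _ hk
  unfold Spec_check check check_alt
  rw [checkGo_gaps mid k stones 0 (-1) 0 (by omega) (by omega) (by unfold Pre_check at hk; omega)]
  norm_num
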